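-- pv_equiv track=rewrite | github.com/JesuisCelestin/python3-data_analyse_16.2 | countries.py | get_first_word
-- ===== SOURCE A (Python) =====
-- def get_first_word(name):
--     new_name = ''
--     for letter in name:
--         new_name += letter
--         if letter == ','or letter == ' ' or letter == '.':
--             new_name = new_name[:-1] #删掉最后的 , 空格 或者 .
--             break
--     return new_name
-- ===== SOURCE B (Python) =====
-- def get_first_word(name):
--     cut = min((p for p in (name.find(','), name.find(' '), name.find('.')) if p >= 0),
--               default=len(name))
--     return name[:cut]
-- ===== Notes on version B (the rewrite author's own statement) =====
-- stated objective: faster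
-- what changed: B locates the first delimiter position with str.find/min and slices the prefix once, instead of A's per-character Python loop that accumulates the result by string concatenation and trims the delimiter after appending it.
import Mathlib
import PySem

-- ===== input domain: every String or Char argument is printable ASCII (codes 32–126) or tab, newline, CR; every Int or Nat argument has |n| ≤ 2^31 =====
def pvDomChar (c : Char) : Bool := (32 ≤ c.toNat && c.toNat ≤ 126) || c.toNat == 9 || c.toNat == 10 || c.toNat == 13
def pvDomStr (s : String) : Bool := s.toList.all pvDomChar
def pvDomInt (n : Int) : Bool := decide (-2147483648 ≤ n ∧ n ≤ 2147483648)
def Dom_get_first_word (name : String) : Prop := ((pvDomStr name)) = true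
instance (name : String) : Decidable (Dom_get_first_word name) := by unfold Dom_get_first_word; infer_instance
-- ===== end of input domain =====

-- B replaces A's accumulate-then-trim loop by finding the first delimiter position and slicing once (idiomatic).

-- ===== PORT A =====
-- the for-loop with its accumulator and break, over the string's characters
def pvGoA (acc : List Char) : List Char → List Char
  | [] => acc
  | c :: rest =>
    let acc' := acc ++ [c]
    if c = ',' ∨ c = ' ' ∨ c = '.' then
      PySem.Chars.slice acc' none (some (-1))   -- new_name[:-1]
    else pvGoA acc' rest

def get_first_word (name : String) : String := String.ofList (pvGoA [] name.toList)

-- ===== PORT B =====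
def get_first_word_alt (name : String) : String :=
  let ps := [PySem.Str.find name ",", PySem.Str.find name " ", PySem.Str.find name "."]
  let cut := (PySem.List.min? (ps.filter (fun p => 0 ≤ p)) id).getD (PySem.Str.len name : Int)
  PySem.Str.slice name none (some cut)

-- ===== PRECONDITION & SPEC =====
def Spec_get_first_word (name : String) (out : String) : Prop := out = get_first_word_alt name
instance (name : String) (out : String) : Decidable (Spec_get_first_word name out) := by unfold Spec_get_first_word; infer_instance

-- ===== CLAIM (what is proved, stated in full; the proofs are below) =====
def Claim_equal_get_first_word : Prop := ∀ (name : String), Dom_get_first_word name → Spec_get_first_word name (get_first_word name)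

-- ===== LEMMAS AND PROOFS =====

-- the character test of A, as a Bool predicate on "keep this character"
def pvKeep (c : Char) : Bool := !(c = ',' ∨ c = ' ' ∨ c = '.')

theorem pvGoA_eq_takeWhile (l acc : List Char) :
    pvGoA acc l = acc ++ l.takeWhile pvKeep := by
  induction l generalizing acc with
  | nil => simp [pvGoA]
  | cons c rest ih =>
    by_cases h : c = ',' ∨ c = ' ' ∨ c = '.'
    · simp [pvGoA, h, PySem.List.slice_to_neg_one, pvKeep]
    · simp [pvGoA, h, ih, pvKeep]

theorem pvSingleton_prefix_iff (a : Char) (t : List Char) :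
    [a] <+: t ↔ t.head? = some a := by
  cases t with
  | nil => simp
  | cons x xs =>
    constructor
    · rintro ⟨u, hu⟩; cases hu; simp
    · intro h; simp at h; subst h; exact ⟨xs, rfl⟩

theorem pvTake_eq_takeWhile (p : Char → Bool) (l : List Char) (n : Nat)
    (hle : n ≤ l.length)
    (hin : ∀ i, i < n → ∀ (hi : i < l.length), p l[i] = true)
    (hout : ∀ (hn : n < l.length), p l[n] = false) :
    l.take n = l.takeWhile p := by
  induction l generalizing n with
  | nil => simp
  | cons c rest ih =>
    cases n with
    | zero =>
      have := hout (by simp)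
      simp at this
      simp [this]
    | succ m =>
      have hc : p c = true := by
        have := hin 0 (Nat.succ_pos m) (by simp)
        simpa using this
      have hrec : rest.take m = rest.takeWhile p := by
        apply ih m (by simpa using hle)
        · intro i hi hi'
          have := hin (i + 1) (by omega) (by simpa using hi')
          simpa using this
        · intro hm
          have := hout (by simpa using hm)
          simpa using this
      simp [hc, hrec]

-- if character l[i] is a delimiter d, then cut ≤ i
theorem pvCut_le_of_delim (l : List Char) (d : Char) (i : Nat) (hi : i < l.length)
    (hd : l[i] = d) (ps : List Int) (hmem : PySem.Chars.find l [d] ∈ ps) :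
    ((PySem.List.min? (ps.filter (fun p => 0 ≤ p)) id).getD (l.length : Int)) ≤ (i : Int) := by
  set f := PySem.Chars.find l [d] with hf
  have hpre : [d] <+: l.drop i := by
    rw [pvSingleton_prefix_iff]
    rw [List.head?_drop, List.getElem?_eq_getElem hi, hd]
  have hinf : [d] <:+: l := hpre.isInfix.trans (List.drop_suffix i l).isInfix
  have hnn : 0 ≤ f := (PySem.Chars.find_nonneg_iff l [d]).2 hinf
  have hspec := PySem.Chars.find_spec (s := l) (sub := [d]) hnn
  have hfle : f ≤ (i : Int) := by
    by_contra hlt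
    rw [Int.not_le] at hlt
    have : ¬ [d] <+: l.drop i := hspec.2 i (by omega)
    exact this hpre
  have hmemf : f ∈ ps.filter (fun p => 0 ≤ p) := by
    rw [List.mem_filter]
    exact ⟨hmem, by simpa using hnn⟩
  obtain ⟨m, hm⟩ : ∃ m, PySem.List.min? (ps.filter (fun p => 0 ≤ p)) id = some m := by
    cases hq : PySem.List.min? (ps.filter (fun p => 0 ≤ p)) id with
    | none =>
      rw [PySem.List.min?_eq_none_iff] at hq
      rw [hq] at hmemf
      simp at hmemf
    | some m => exact ⟨m, rfl⟩
  have hmf : m ≤ f := by simpa using PySem.List.min?_isMin hm f hmemf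
  simp only [hm, Option.getD_some]
  omega

theorem get_first_word_alt_toList (name : String) :
    (get_first_word_alt name).toList = name.toList.takeWhile pvKeep := by
  unfold get_first_word_alt
  set l := name.toList with hl
  set ps := [PySem.Str.find name ",", PySem.Str.find name " ", PySem.Str.find name "."] with hps
  set fs := ps.filter (fun p => 0 ≤ p) with hfs
  set cut := (PySem.List.min? fs id).getD (PySem.Str.len name : Int) with hcut
  have hlen : PySem.Str.len name = l.length := by simp [PySem.Str.len_eq, hl]
  -- 0 ≤ cut and cut ≤ l.length
  have hmem_ps : ∀ m ∈ fs, m ∈ ps ∧ 0 ≤ m := by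
    intro m hm
    rw [hfs, List.mem_filter] at hm
    exact ⟨hm.1, by simpa using hm.2⟩
  have hfind_le : ∀ m ∈ ps, m ≤ (l.length : Int) := by
    intro m hm
    rw [hps] at hm
    simp only [List.mem_cons, List.not_mem_nil, or_false] at hm
    rcases hm with h | h | h <;>
      (subst h; rw [PySem.Str.find_eq]; exact PySem.Chars.find_le_length _ _)
  have hcut_nn : 0 ≤ cut := by
    rw [hcut]
    cases hq : PySem.List.min? fs id with
    | none =>
      simp only [Option.getD_none]
      rw [hlen]
      positivity
    | some m =>
      have := (hmem_ps m (PySem.List.min?_mem hq)).2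
      simpa using this
  have hcut_le : cut ≤ (l.length : Int) := by
    rw [hcut]
    cases hq : PySem.List.min? fs id with
    | none =>
      simp only [Option.getD_none]
      rw [hlen]
    | some m =>
      have := hfind_le m (hmem_ps m (PySem.List.min?_mem hq)).1
      simpa using this
  have hcut_def : cut = (PySem.List.min? fs id).getD ((l.length : Nat) : Int) := by
    rw [hcut, hlen]
  rw [PySem.Str.toList_slice]
  show PySem.List.slice l none (some cut) = List.takeWhile pvKeep l
  rw [PySem.List.slice_to _ hcut_nn]
  apply pvTake_eq_takeWhile
  · omega
  · -- every index before cut keeps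
    intro i hi hi'
    by_contra hk0
    have hk : l[i] = ',' ∨ l[i] = ' ' ∨ l[i] = '.' := by
      by_cases h1 : l[i] = ','
      · exact Or.inl h1
      · by_cases h2 : l[i] = ' '
        · exact Or.inr (Or.inl h2)
        · exact Or.inr (Or.inr (by simpa [pvKeep, h1, h2] using hk0))
    have hfindmem : PySem.Chars.find l [l[i]] ∈ ps := by
      rw [hps]
      rcases hk with h | h | h <;> rw [h] <;>
        simp [PySem.Str.find_eq, ← hl]
    have := pvCut_le_of_delim l l[i] i hi' rfl ps hfindmem
    rw [← hcut_def] at this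
    omega
  · -- the character at cut (if any) is a delimiter
    intro hn
    have hne : fs ≠ [] := by
      intro hnil
      have h0 : PySem.List.min? ([] : List Int) id = none := (PySem.List.min?_eq_none_iff [] id).2 rfl
      rw [hcut, hnil, h0, Option.getD_none, hlen] at hn
      omega
    obtain ⟨m, hm⟩ : ∃ m, PySem.List.min? fs id = some m := by
      cases hq : PySem.List.min? fs id with
      | none => exact absurd ((PySem.List.min?_eq_none_iff fs id).1 hq) hne
      | some m => exact ⟨m, rfl⟩
    have hmval : cut = m := by simp [hcut, hm]
    have hmps := hmem_ps m (PySem.List.min?_mem hm)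
    -- m is find l [d] for one of the three delimiters
    obtain ⟨d, hdel, hfd⟩ : ∃ d, (d = ',' ∨ d = ' ' ∨ d = '.') ∧ m = PySem.Chars.find l [d] := by
      have := hmps.1
      rw [hps] at this
      simp only [List.mem_cons, List.not_mem_nil, or_false] at this
      rcases this with h | h | h
      · exact ⟨',', Or.inl rfl, by rw [h, PySem.Str.find_eq]; rfl⟩
      · exact ⟨' ', Or.inr (Or.inl rfl), by rw [h, PySem.Str.find_eq]; rfl⟩
      · exact ⟨'.', Or.inr (Or.inr rfl), by rw [h, PySem.Str.find_eq]; rfl⟩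
    have hnn : 0 ≤ PySem.Chars.find l [d] := hfd ▸ hmps.2
    have hspec := (PySem.Chars.find_spec (s := l) (sub := [d]) hnn).1
    rw [pvSingleton_prefix_iff, List.head?_drop] at hspec
    have hidx : (PySem.Chars.find l [d]).toNat = cut.toNat := by
      rw [hmval, hfd]
    rw [hidx] at hspec
    have : l[cut.toNat] = d := by
      have hlt : cut.toNat < l.length := hn
      rw [List.getElem?_eq_getElem hlt] at hspec
      simpa using hspec
    rcases hdel with h | h | h <;> simp [pvKeep, this, h]

-- ===== VERDICT (by name: the statement is the Claim_ definition above) =====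
theorem get_first_word_spec : Claim_equal_get_first_word := by
  intro name _
  unfold Spec_get_first_word get_first_word
  rw [pvGoA_eq_takeWhile]
  have h := get_first_word_alt_toList name
  apply String.ext ?_ |>.symm
  simpa using h
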